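-- pv_equiv track=rewrite | github.com/LorenzoDoremi/PythonImpl | esercizi_ed_esempi/stringhe.py | flux_decode
-- ===== SOURCE A (Python) =====
-- def flux_decode(string, key):
--
--     temp = ""
--     for i in range(0,len(string)):
--
--         key_value = int(key[i%len(key)])
--         if i == 0:
--             temp+= chr((ord(string[i])-key_value)%255)
--         else:
--             temp+=chr((ord(string[i])-key_value-ord(temp[i-1]))%255)
--     return temp
-- ===== SOURCE B (Python) =====
-- def flux_decode(string, key):
--     # closed-form: the chained recurrence v[i] = (d[i] - v[i-1]) % 255 telescopes to the
--     # alternating prefix sum v[i] = ((-1)^i * sum_j (-1)^j d[j]) % 255, computed in stages.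
--     diffs = [ord(ch) - int(key[i % len(key)]) for i, ch in enumerate(string)]
--     s = 0
--     alts = []
--     for i, d in enumerate(diffs):
--         s += d if i % 2 == 0 else -d
--         alts.append(s if i % 2 == 0 else -s)
--     return "".join(chr(a % 255) for a in alts)
-- ===== Notes on version B (the rewrite author's own statement) =====
-- stated objective: alternative
-- what changed: B solves the recurrence in closed form: v[i] = ((-1)^i * alternating prefix sum of the diffs) mod 255, computed in three staged passes (diff list, signed running sum with sign-flipped entries, final mod/chr map), with no i==0 branch and no feedback of any previous output value into the loop.
import Mathlib
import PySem

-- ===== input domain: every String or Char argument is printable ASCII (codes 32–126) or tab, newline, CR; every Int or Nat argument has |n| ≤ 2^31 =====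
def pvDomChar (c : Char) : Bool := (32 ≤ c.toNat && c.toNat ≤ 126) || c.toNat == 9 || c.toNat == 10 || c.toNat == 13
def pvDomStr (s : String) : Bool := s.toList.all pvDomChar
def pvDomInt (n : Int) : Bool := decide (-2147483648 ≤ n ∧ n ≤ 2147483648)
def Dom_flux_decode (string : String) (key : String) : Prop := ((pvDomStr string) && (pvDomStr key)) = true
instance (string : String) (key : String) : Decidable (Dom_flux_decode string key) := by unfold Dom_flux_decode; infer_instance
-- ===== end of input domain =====

-- B replaces A's chained loop (which feeds ord(temp[i-1]) back in, with an i==0 branch) by the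
-- telescoped closed form v[i] = ((-1)^i * alternating prefix sum of the keyed diffs) mod 255,
-- computed in three staged passes with no output feedback: a genuinely different decomposition.

-- ===== PORT A =====
-- one loop iteration of A: temp += chr((ord(string[i]) - int(key[i%len(key)]) [- ord(temp[i-1])]) % 255)
def fluxAStep (s k : List Char) (temp : List Char) (i : Int) : List Char :=
  let kv : Int :=
    (PySem.Int.ofStr? (String.mk [PySem.List.pyGetD k (PySem.Int.mod i (k.length : Int)) ' '])).getD 0
  if i = 0 then
    temp ++ [Char.ofNat (PySem.Int.mod (((PySem.List.pyGetD s i ' ').toNat : Int) - kv) 255).toNat]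
  else
    temp ++ [Char.ofNat (PySem.Int.mod (((PySem.List.pyGetD s i ' ').toNat : Int) - kv
                - ((PySem.List.pyGetD temp (i - 1) ' ').toNat : Int)) 255).toNat]

def flux_decode (string : String) (key : String) : String :=
  String.mk ((PySem.List.pyRange 0 (string.toList.length : Int) 1).foldl
    (fluxAStep string.toList key.toList) [])

-- ===== PORT B =====
-- stage 1: diffs = [ord(ch) - int(key[i % len(key)]) for i, ch in enumerate(string)]
def fluxDiffs (s k : List Char) : List Int :=
  (PySem.List.enumerate s).map (fun p =>
    ((p.2.toNat : Int) -
      (PySem.Int.ofStr? (String.mk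
        [PySem.List.pyGetD k (PySem.Int.mod p.1 (k.length : Int)) ' '])).getD 0))

-- stage 2, one iteration: s += d if i % 2 == 0 else -d; alts.append(s if i % 2 == 0 else -s)
def fluxAltStep (st : Int × List Int) (p : Int × Int) : Int × List Int :=
  let s := st.1 + (if PySem.Int.mod p.1 2 = 0 then p.2 else -p.2)
  (s, st.2 ++ [if PySem.Int.mod p.1 2 = 0 then s else -s])

-- stage 3: "".join(chr(a % 255) for a in alts)
def flux_decode_alt (string : String) (key : String) : String :=
  let diffs := fluxDiffs string.toList key.toList
  let r := (PySem.List.enumerate diffs).foldl fluxAltStep (0, [])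
  String.mk (r.2.map (fun a => Char.ofNat (PySem.Int.mod a 255).toNat))

-- ===== PRECONDITION & SPEC =====
-- Pre_ excludes exactly the inputs where A raises: a non-empty string with an empty key
-- (ZeroDivisionError) or with a non-digit key character at a used position (ValueError of int()).
def Pre_flux_decode (string : String) (key : String) : Prop :=
  string.toList = [] ∨
    (key.toList ≠ [] ∧
      ∀ i ∈ List.range string.toList.length,
        (key.toList.getD (i % key.toList.length) ' ').isDigit = true)
instance (string : String) (key : String) : Decidable (Pre_flux_decode string key) := by
  unfold Pre_flux_decode; infer_instance

def pvWitness_flux_decode : String × String := ("Hello!", "31415")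

def Spec_flux_decode (string : String) (key : String) (out : String) : Prop :=
  out = flux_decode_alt string key
instance (string : String) (key : String) (out : String) : Decidable (Spec_flux_decode string key out) := by
  unfold Spec_flux_decode; infer_instance

-- ===== CLAIM (what is proved, stated in full; the proofs are below) =====
def Claim_equal_flux_decode : Prop := ∀ (string : String) (key : String),
  Dom_flux_decode string key → Pre_flux_decode string key →
  Spec_flux_decode string key (flux_decode string key)

-- ===== LEMMAS AND PROOFS =====

-- the prev value encoded in A's output-so-far: the code of its last character (0 when empty)
def prevOf (l : List Char) : Int := (l.getLast?.map (fun c => (c.toNat : Int))).getD 0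

-- partial A-fold over range(0, i)
def afold (s k : List Char) (i : Nat) : List Char :=
  (PySem.List.pyRange 0 (i : Int) 1).foldl (fluxAStep s k) []

-- partial B-stage-2-fold over the first i enumerated diffs
def bfold (s k : List Char) (i : Nat) : Int × List Int :=
  ((PySem.List.enumerate (fluxDiffs s k)).take i).foldl fluxAltStep (0, [])

-- the key value read at position j, shared by both characterisations
def kvOf (k : List Char) (j : Nat) : Int :=
  (PySem.Int.ofStr? (String.mk [k.getD j ' '])).getD 0

-- the diff value at position i
def dOf (s k : List Char) (i : Nat) : Int :=
  (((s.getD i ' ').toNat : Int)) - kvOf k (i % k.length)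

-- stage-3 map on one entry
def toCh (a : Int) : Char := Char.ofNat (PySem.Int.mod a 255).toNat

theorem char_toNat_ofNat_of_lt {n : Nat} (h : n < 255) : (Char.ofNat n).toNat = n := by
  have hv : n.isValidChar := Or.inl (by omega)
  simp [Char.ofNat, hv, Char.toNat, Char.ofNatAux]

theorem mod255_bounds (x : Int) : 0 ≤ PySem.Int.mod x 255 ∧ PySem.Int.mod x 255 < 255 := by
  rw [PySem.Int.mod_eq_emod_of_pos (by norm_num)]
  exact ⟨Int.emod_nonneg x (by norm_num), Int.emod_lt_of_pos x (by norm_num)⟩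

theorem afold_succ (s k : List Char) (i : Nat) :
    afold s k (i + 1) = fluxAStep s k (afold s k i) (i : Int) := by
  unfold afold
  rw [show (((i + 1 : Nat) : Int)) = (i : Int) + 1 by push_cast; ring,
      PySem.List.pyRange_one_succ_right (by positivity), List.foldl_append]
  rfl

theorem stepA_eq (s k : List Char) (i : Nat) (hi : i < s.length) (temp : List Char)
    (hlen : temp.length = i) :
    fluxAStep s k temp (i : Int) =
      temp ++ [toCh (dOf s k i - prevOf temp)] := by
  have hd : dOf s k i = ((s[i].toNat : Int)) - kvOf k (i % k.length) := by
    unfold dOf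
    rw [List.getD_eq_getElem?_getD, List.getElem?_eq_getElem hi]; rfl
  unfold fluxAStep toCh
  have hmod : PySem.Int.mod (i : Int) (k.length : Int) = ((i % k.length : Nat) : Int) :=
    PySem.Int.mod_natCast i k.length
  have hsget : PySem.List.pyGetD s (i : Int) ' ' = s[i] := by
    simp [List.getD_eq_getElem?_getD, List.getElem?_eq_getElem hi]
  by_cases hi0 : i = 0
  · subst hi0
    have ht : temp = [] := List.eq_nil_of_length_eq_zero hlen
    subst ht
    rw [if_pos (by norm_num : ((0 : Nat) : Int) = 0), hsget, hmod, PySem.List.pyGetD_natCast,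
        show prevOf ([] : List Char) = 0 from rfl, hd, sub_zero]
    rfl
  · have hine : (i : Int) ≠ 0 := by exact_mod_cast hi0
    have hne : temp ≠ [] := by intro h; rw [h] at hlen; simp at hlen; omega
    have hread : PySem.List.pyGetD temp ((i : Int) - 1) ' ' = temp.getLast hne := by
      have h1 : ((i : Int) - 1) = (((i - 1 : Nat)) : Int) := by omega
      rw [h1, PySem.List.pyGetD_natCast, List.getD_eq_getElem?_getD,
          List.getElem?_eq_getElem (by omega : i - 1 < temp.length), List.getLast_eq_getElem]
      simp [hlen]
    have hprev : prevOf temp = ((temp.getLast hne).toNat : Int) := by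
      simp [prevOf, List.getLast?_eq_some_getLast hne]
    rw [if_neg hine, hsget, hmod, PySem.List.pyGetD_natCast, hread, hprev, hd]
    rfl

theorem prevOf_concat (l : List Char) (x : Int) :
    prevOf (l ++ [toCh x]) = PySem.Int.mod x 255 := by
  have hb := mod255_bounds x
  rw [prevOf, List.getLast?_concat, Option.map_some, Option.getD_some, toCh,
      char_toNat_ofNat_of_lt (by omega)]
  omega

theorem diffs_getElem (s k : List Char) (i : Nat) (hi : i < s.length) :
    (fluxDiffs s k)[i]'(by simp [fluxDiffs, PySem.List.length_enumerate, hi]) = dOf s k i := by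
  unfold fluxDiffs dOf kvOf
  rw [List.getElem_map, PySem.List.getElem_enumerate]
  simp only [zero_add, PySem.Int.mod_natCast, PySem.List.pyGetD_natCast]
  simp [List.getD_eq_getElem?_getD, List.getElem?_eq_getElem hi]

theorem fluxDiffs_length (s k : List Char) : (fluxDiffs s k).length = s.length := by
  simp [fluxDiffs, PySem.List.length_enumerate]

theorem bfold_succ (s k : List Char) (i : Nat) (hi : i < s.length) :
    bfold s k (i + 1) = fluxAltStep (bfold s k i) ((i : Int), dOf s k i) := by
  unfold bfold
  have hlen : i < (PySem.List.enumerate (fluxDiffs s k)).length := by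
    simp [PySem.List.length_enumerate, fluxDiffs_length, hi]
  rw [List.take_add_one, List.getElem?_eq_getElem hlen]
  simp only [Option.toList_some, List.foldl_append, List.foldl_cons, List.foldl_nil]
  congr 1
  rw [PySem.List.getElem_enumerate]
  simp [diffs_getElem s k i hi]

-- emod congruences for the two parity cases, used in the induction step
theorem mod_case_even (d S : Int) :
    PySem.Int.mod (d - PySem.Int.mod (-S) 255) 255 = PySem.Int.mod (S + d) 255 := by
  simp only [PySem.Int.mod_eq_emod_of_pos (by norm_num : (0:Int) < 255)]
  omega

theorem mod_case_odd (d S : Int) :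
    PySem.Int.mod (d - PySem.Int.mod S 255) 255 = PySem.Int.mod (d - S) 255 := by
  simp only [PySem.Int.mod_eq_emod_of_pos (by norm_num : (0:Int) < 255)]
  omega

-- the loop invariant tying A's chained fold to B's staged alternating sum
theorem loop_inv (s k : List Char) :
    ∀ i, i ≤ s.length →
      (bfold s k i).2.map toCh = afold s k i ∧
      (afold s k i).length = i ∧
      prevOf (afold s k i) =
        PySem.Int.mod (if i % 2 = 0 then -(bfold s k i).1 else (bfold s k i).1) 255 := by
  intro i
  induction i with
  | zero =>
      intro _
      refine ⟨?_, ?_, ?_⟩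
      · simp [bfold, afold, PySem.List.pyRange_one_eq_nil]
      · simp [afold, PySem.List.pyRange_one_eq_nil]
      · simp [bfold, afold, PySem.List.pyRange_one_eq_nil, prevOf, PySem.Int.mod]
  | succ i ih =>
      intro hle
      have hi : i < s.length := by omega
      obtain ⟨hmap, hlen, hprev⟩ := ih (by omega)
      have hA : afold s k (i + 1) = afold s k i ++ [toCh (dOf s k i - prevOf (afold s k i))] := by
        rw [afold_succ, stepA_eq s k i hi _ hlen]
      have hB := bfold_succ s k i hi
      set S := (bfold s k i).1 with hS
      by_cases hpar : i % 2 = 0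
      · -- even index: entry is S + d
        have hdvd : (2 : Int) ∣ (i : Int) := by omega
        have hBval : bfold s k (i + 1) =
            (S + dOf s k i, (bfold s k i).2 ++ [S + dOf s k i]) := by
          rw [hB]; simp [fluxAltStep, hdvd]; exact hS.symm
        have heq : toCh (dOf s k i - prevOf (afold s k i)) = toCh (S + dOf s k i) := by
          rw [hprev, if_pos hpar, toCh, toCh, mod_case_even]
        refine ⟨?_, ?_, ?_⟩
        · rw [hBval, hA, List.map_append, hmap]; simp [heq]
        · rw [hA]; simp [hlen]
        · rw [hA, heq, prevOf_concat, hBval]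
          have h1 : (i + 1) % 2 = 1 := by omega
          rw [h1]
          norm_num
      · -- odd index: entry is -(S - d) = d - S
        have hndvd : ¬ (2 : Int) ∣ (i : Int) := by omega
        have hBval : bfold s k (i + 1) =
            (S - dOf s k i, (bfold s k i).2 ++ [-(S - dOf s k i)]) := by
          rw [hB]; simp [fluxAltStep, hndvd]; constructor <;> ring
        have heq : toCh (dOf s k i - prevOf (afold s k i)) = toCh (-(S - dOf s k i)) := by
          rw [hprev, if_neg hpar, toCh, toCh,
              show -(S - dOf s k i) = dOf s k i - S by ring, mod_case_odd]
        refine ⟨?_, ?_, ?_⟩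
        · rw [hBval, hA, List.map_append, hmap]; simp [heq]
        · rw [hA]; simp [hlen]
        · rw [hA, heq, prevOf_concat, hBval]
          have h0 : (i + 1) % 2 = 0 := by omega
          rw [h0]
          norm_num

-- ===== VERDICT (by name: the statement is the Claim_ definition above) =====
theorem flux_decode_spec : Claim_equal_flux_decode := by
  intro string key _ _
  unfold Spec_flux_decode
  obtain ⟨hmap, -, -⟩ :=
    loop_inv string.toList key.toList string.toList.length (le_refl _)
  have hfull : bfold string.toList key.toList string.toList.length =
      (PySem.List.enumerate (fluxDiffs string.toList key.toList)).foldl fluxAltStep (0, []) := by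
    unfold bfold
    rw [List.take_of_length_le (by simp [PySem.List.length_enumerate, fluxDiffs_length])]
  have h1 : flux_decode string key =
      String.mk (afold string.toList key.toList string.toList.length) := rfl
  rw [h1, ← hmap, hfull]
  rfl
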